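-- pv_equiv track=rewrite | github.com/midorimide/PHPFormatter | src/PHPFormatter.py | process_keep_indents_on_empty_lines
-- ===== SOURCE A (Python) =====
-- def process_keep_indents_on_empty_lines(code, need):
-- 	result = ''
-- 	arr = code.split('\n')
-- 	for i, line in enumerate(arr):
-- 		indents_only = True
-- 		for symbol in line:
-- 			if not symbol in ['\t', ' ']:
-- 				indents_only = False
-- 				break
-- 		if indents_only and not need:
-- 			result += ('\n' if i + 1 < len(arr) else '')
-- 		else:
-- 			result += line + ('\n' if i + 1 < len(arr) else '')
-- 	return result
-- ===== SOURCE B (Python) =====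
-- def process_keep_indents_on_empty_lines(code, need):
--     if need:
--         return code
--     out = []
--     ws = []          # pending run of spaces/tabs not yet known to be emitted
--     dirty = False    # current line has seen a non-whitespace character
--     for c in code:
--         if c == ' ' or c == '\t':
--             ws.append(c)
--         elif c == '\n':
--             if dirty:
--                 out += ws
--             ws = []
--             out.append('\n')
--             dirty = False
--         else:
--             out += ws
--             ws = []
--             out.append(c)
--             dirty = True
--     if dirty:
--         out += ws
--     return ''.join(out)
-- ===== Notes on version B (the rewrite author's own statement) =====
-- stated objective: alternative
-- what changed: B never splits the input into lines: it returns code unchanged when need is true, and otherwise makes a single streaming pass over the characters with a state machine (pending whitespace-run buffer + line-dirty flag) that drops the buffer at a newline on a still-clean line, replacing A's split-per-line loop with its nested per-character scan.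
import Mathlib
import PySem

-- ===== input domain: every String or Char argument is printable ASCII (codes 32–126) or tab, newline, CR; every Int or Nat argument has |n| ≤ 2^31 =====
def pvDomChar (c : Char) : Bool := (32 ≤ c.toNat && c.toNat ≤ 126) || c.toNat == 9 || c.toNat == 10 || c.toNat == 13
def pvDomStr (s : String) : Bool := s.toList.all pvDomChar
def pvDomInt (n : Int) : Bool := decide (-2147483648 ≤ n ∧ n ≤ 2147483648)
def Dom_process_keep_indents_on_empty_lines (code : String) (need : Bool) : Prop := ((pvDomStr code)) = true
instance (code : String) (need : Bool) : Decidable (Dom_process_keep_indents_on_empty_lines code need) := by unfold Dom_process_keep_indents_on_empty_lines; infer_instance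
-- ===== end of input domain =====

-- B is a single streaming pass over the characters (a state machine buffering pending space/tab runs)
-- instead of A's split-into-lines loop with a per-character scan; same behaviour, alternative algorithm.

-- ===== PORT A =====
-- per-char loop 'for symbol in line: if not symbol in ['\t',' ']: indents_only = False; break'
def pvIndentsOnly : List Char → Bool
  | [] => true
  | c :: rest => if !(c == '\t' || c == ' ') then false else pvIndentsOnly rest

def process_keep_indents_on_empty_lines (code : String) (need : Bool) : String :=
  let arr := PySem.Chars.splitOn code.toList ['\n']
  let result := (PySem.List.enumerate arr).foldl
    (fun result p =>
      let indents_only := pvIndentsOnly p.2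
      if indents_only && !need then
        result ++ (if p.1 + 1 < (arr.length : Int) then ['\n'] else [])
      else
        result ++ p.2 ++ (if p.1 + 1 < (arr.length : Int) then ['\n'] else [])) []
  String.ofList result

-- ===== PORT B =====
-- one step of Source B's for-loop: state = (out, ws, dirty)
def pvStep (st : List Char × List Char × Bool) (c : Char) : List Char × List Char × Bool :=
  let (out, ws, dirty) := st
  if c == ' ' || c == '\t' then (out, ws ++ [c], dirty)
  else if c == '\n' then ((if dirty then out ++ ws else out) ++ ['\n'], [], false)
  else (out ++ ws ++ [c], [], true)

def process_keep_indents_on_empty_lines_alt (code : String) (need : Bool) : String :=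
  if need then code
  else
    let st := code.toList.foldl pvStep ([], [], false)
    String.ofList (if st.2.2 then st.1 ++ st.2.1 else st.1)

-- ===== PRECONDITION & SPEC =====
def Spec_process_keep_indents_on_empty_lines (code : String) (need : Bool) (out : String) : Prop := out = process_keep_indents_on_empty_lines_alt code need
instance (code : String) (need : Bool) (out : String) : Decidable (Spec_process_keep_indents_on_empty_lines code need out) := by unfold Spec_process_keep_indents_on_empty_lines; infer_instance

-- ===== CLAIM (what is proved, stated in full; the proofs are below) =====
def Claim_equal_process_keep_indents_on_empty_lines : Prop := ∀ (code : String) (need : Bool), Dom_process_keep_indents_on_empty_lines code need → Spec_process_keep_indents_on_empty_lines code need (process_keep_indents_on_empty_lines code need)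

-- ===== LEMMAS AND PROOFS =====

-- intercalate over a snoc
theorem pv_intercalate_concat (sep y : List Char) (xs : List (List Char)) :
    sep.intercalate (xs ++ [y]) =
      sep.intercalate xs ++ (if xs = [] then [] else sep) ++ y := by
  induction xs with
  | nil => simp [List.intercalate]
  | cons a t ih =>
    cases t with
    | nil => simp [List.intercalate]
    | cons b t' =>
      have h1 : sep.intercalate (a :: (b :: t') ++ [y]) =
          a ++ sep ++ sep.intercalate ((b :: t') ++ [y]) := by
        simp [List.intercalate]
      have h2 : sep.intercalate (a :: b :: t') = a ++ sep ++ sep.intercalate (b :: t') := by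
        simp [List.intercalate]
      simp only [List.cons_append] at h1 ih ⊢
      rw [h1, ih, h2]
      simp

theorem pv_join_go (sep : List Char) (hsep : sep ≠ []) :
    ∀ (fuel : Nat) (l cur : List Char) (acc : List (List Char)), l.length ≤ fuel →
      sep.intercalate (PySem.Chars.splitOn.go sep fuel l cur acc) =
        sep.intercalate acc.reverse ++ (if acc = [] then [] else sep) ++ cur.reverse ++ l := by
  intro fuel
  induction fuel with
  | zero =>
    intro l cur acc hl
    have : l = [] := List.eq_nil_of_length_eq_zero (Nat.le_zero.mp hl)
    subst this
    show sep.intercalate (((cur.reverse ++ []) :: acc).reverse) = _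
    rw [List.reverse_cons, pv_intercalate_concat]
    simp
  | succ fuel ih =>
    intro l cur acc hl
    cases l with
    | nil =>
      show sep.intercalate ((cur.reverse :: acc).reverse) = _
      rw [List.reverse_cons, pv_intercalate_concat]
      simp
    | cons c rest =>
      by_cases hpre : sep.isPrefixOf (c :: rest) = true
      · have hdroplen : (List.drop sep.length (c :: rest)).length ≤ fuel := by
          have hs : 1 ≤ sep.length := by
            cases sep with
            | nil => exact absurd rfl hsep
            | cons _ _ => simp
          simp only [List.length_drop, List.length_cons]
          simp only [List.length_cons] at hl
          omega
        have hpref : sep ++ List.drop sep.length (c :: rest) = c :: rest :=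
          List.prefix_iff_eq_append.mp (List.isPrefixOf_iff_prefix.mp hpre)
        show sep.intercalate
          (if sep.isPrefixOf (c :: rest) = true then
              PySem.Chars.splitOn.go sep fuel (List.drop sep.length (c :: rest)) []
                (cur.reverse :: acc)
           else PySem.Chars.splitOn.go sep fuel rest (c :: cur) acc) = _
        rw [if_pos hpre, ih _ _ _ hdroplen, List.reverse_cons, pv_intercalate_concat]
        generalize hD : List.drop sep.length (c :: rest) = D at hpref ⊢
        rw [← hpref]
        by_cases hacc : acc = [] <;>
          simp [hacc, List.append_assoc, List.reverse_eq_nil_iff]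
      · have hrest : rest.length ≤ fuel := by
          simp only [List.length_cons] at hl
          omega
        show sep.intercalate
          (if sep.isPrefixOf (c :: rest) = true then
              PySem.Chars.splitOn.go sep fuel (List.drop sep.length (c :: rest)) []
                (cur.reverse :: acc)
           else PySem.Chars.splitOn.go sep fuel rest (c :: cur) acc) = _
        rw [if_neg hpre, ih _ _ _ hrest]
        simp

theorem pv_join_splitOn (sep s : List Char) (hsep : sep ≠ []) :
    PySem.Chars.join sep (PySem.Chars.splitOn s sep) = s := by
  show sep.intercalate (PySem.Chars.splitOn.go sep (s.length + 1) s [] []) = s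
  rw [pv_join_go sep hsep (s.length + 1) s [] [] (by omega)]
  simp [List.intercalate]

-- A's fold over enumerate is join of the mapped lines
theorem pv_foldA (need : Bool) (n : Int) :
    ∀ (l : List (List Char)) (s : Int) (acc : List Char), s + l.length = n →
      (PySem.List.enumerate l s).foldl
        (fun result p =>
          let indents_only := pvIndentsOnly p.2
          if indents_only && !need then
            result ++ (if p.1 + 1 < n then ['\n'] else [])
          else
            result ++ p.2 ++ (if p.1 + 1 < n then ['\n'] else [])) acc
      = acc ++ PySem.Chars.join ['\n']
          (l.map (fun line => if pvIndentsOnly line && !need then [] else line)) := by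
  intro l
  induction l with
  | nil =>
    intro s acc _
    simp [PySem.List.enumerate, PySem.Chars.join, List.intercalate]
  | cons x t ih =>
    intro s acc hn
    rw [PySem.List.enumerate_cons, List.foldl_cons]
    cases t with
    | nil =>
      have hs1 : ¬ (s + 1 < n) := by
        simp only [List.length_cons, List.length_nil] at hn
        omega
      simp only [PySem.List.enumerate, List.foldl_nil, List.map_cons, List.map_nil]
      simp only [hs1]
      by_cases hc : (pvIndentsOnly x && !need) = true
      · simp [hc, PySem.Chars.join, List.intercalate]
      · simp [hc, PySem.Chars.join, List.intercalate]
    | cons y t' =>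
      have hs1 : s + 1 < n := by
        simp only [List.length_cons] at hn
        omega
      have hn' : s + 1 + ((y :: t').length : Int) = n := by
        simp only [List.length_cons] at hn ⊢
        push_cast at hn ⊢
        omega
      by_cases hc : (pvIndentsOnly x && !need) = true
      · rw [show (if pvIndentsOnly x && !need then
            acc ++ (if s + 1 < n then ['\n'] else [])
          else acc ++ x ++ (if s + 1 < n then ['\n'] else [])) = acc ++ ['\n'] from by
            simp [hc, hs1]]
        rw [ih (s + 1) (acc ++ ['\n']) hn']
        simp only [List.map_cons, hc]
        simp [PySem.Chars.join, List.intercalate]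
      · rw [show (if pvIndentsOnly x && !need then
            acc ++ (if s + 1 < n then ['\n'] else [])
          else acc ++ x ++ (if s + 1 < n then ['\n'] else [])) = acc ++ x ++ ['\n'] from by
            simp [hc, hs1]]
        rw [ih (s + 1) (acc ++ x ++ ['\n']) hn']
        simp only [List.map_cons, if_neg hc]
        simp [PySem.Chars.join, List.intercalate]

-- ---- proof-side recursive characterisation of splitOn on '\n' ----
def pvConsHead (x : List Char) : List (List Char) → List (List Char)
  | [] => [x]
  | l :: t => (x ++ l) :: t

def pvLines : List Char → List (List Char)
  | [] => [[]]
  | c :: r => if c = '\n' then [] :: pvLines r else pvConsHead [c] (pvLines r)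

theorem pvLines_ne_nil (s : List Char) : pvLines s ≠ [] := by
  cases s with
  | nil => simp [pvLines]
  | cons c r =>
    simp only [pvLines]
    split
    · simp
    · cases h : pvLines r <;> simp [pvConsHead]

theorem pvConsHead_append (a b : List Char) (ls : List (List Char)) :
    pvConsHead (a ++ b) ls = pvConsHead a (pvConsHead b ls) := by
  cases ls <;> simp [pvConsHead]

theorem pv_go_lines :
    ∀ (fuel : Nat) (l cur : List Char) (acc : List (List Char)), l.length ≤ fuel →
      PySem.Chars.splitOn.go ['\n'] fuel l cur acc =
        acc.reverse ++ pvConsHead cur.reverse (pvLines l) := by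
  intro fuel
  induction fuel with
  | zero =>
    intro l cur acc hl
    have : l = [] := List.eq_nil_of_length_eq_zero (Nat.le_zero.mp hl)
    subst this
    show ((cur.reverse ++ []) :: acc).reverse = _
    simp [pvLines, pvConsHead]
  | succ fuel ih =>
    intro l cur acc hl
    cases l with
    | nil =>
      show ((cur.reverse :: acc)).reverse = _
      simp [pvLines, pvConsHead]
    | cons c rest =>
      have hrest : rest.length ≤ fuel := by
        simp only [List.length_cons] at hl; omega
      show (if List.isPrefixOf ['\n'] (c :: rest) = true then
              PySem.Chars.splitOn.go ['\n'] fuel (List.drop (['\n'] : List Char).length (c :: rest)) []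
                (cur.reverse :: acc)
            else PySem.Chars.splitOn.go ['\n'] fuel rest (c :: cur) acc) = _
      by_cases hc : c = '\n'
      · subst hc
        rw [if_pos (by simp [List.isPrefixOf])]
        have : List.drop (['\n'] : List Char).length ('\n' :: rest) = rest := by simp
        rw [this, ih rest [] (cur.reverse :: acc) hrest]
        cases h : pvLines rest with
        | nil => exact absurd h (pvLines_ne_nil rest)
        | cons l0 t0 =>
          simp [pvLines, pvConsHead, h]
      · rw [if_neg (by simp [List.isPrefixOf, hc, Ne.symm hc])]
        rw [ih rest (c :: cur) acc hrest]
        simp only [pvLines, if_neg hc, List.reverse_cons]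
        rw [pvConsHead_append]

theorem pv_splitOn_eq_lines (s : List Char) :
    PySem.Chars.splitOn s ['\n'] = pvLines s := by
  show PySem.Chars.splitOn.go ['\n'] (s.length + 1) s [] [] = _
  rw [pv_go_lines (s.length + 1) s [] [] (by omega)]
  cases h : pvLines s with
  | nil => exact absurd h (pvLines_ne_nil s)
  | cons l0 t0 => simp [pvConsHead]

-- ---- proof-side recursive view of B's streaming pass ----
def pvBlank (line : List Char) : List Char := if pvIndentsOnly line then [] else line

def pvJ (ts : List (List Char)) : List Char :=
  (ts.map (fun y => '\n' :: pvBlank y)).flatten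

def pvF (ws : List Char) (dirty : Bool) : List Char → List Char
  | [] => if dirty then ws else []
  | c :: r => if c == ' ' || c == '\t' then pvF (ws ++ [c]) dirty r else ws ++ c :: pvF [] true r

def pvRun (s : List Char) (ws : List Char) (dirty : Bool) : List Char :=
  match s with
  | [] => if dirty then ws else []
  | c :: r =>
    if c == ' ' || c == '\t' then pvRun r (ws ++ [c]) dirty
    else if c == '\n' then (if dirty then ws else []) ++ '\n' :: pvRun r [] false
    else ws ++ c :: pvRun r [] true

def pvG (ws : List Char) (dirty : Bool) : List (List Char) → List Char
  | [] => []
  | l :: t => pvF ws dirty l ++ pvJ t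

theorem pvF_true (line : List Char) : ∀ ws, pvF ws true line = ws ++ line := by
  induction line with
  | nil => intro ws; simp [pvF]
  | cons c r ih =>
    intro ws
    by_cases hc : (c == ' ' || c == '\t') = true
    · simp [pvF, hc, ih]
    · simp [pvF, hc, ih]

theorem pvF_false (line : List Char) :
    ∀ ws, pvF ws false line = if pvIndentsOnly line then [] else ws ++ line := by
  induction line with
  | nil => intro ws; simp [pvF, pvIndentsOnly]
  | cons c r ih =>
    intro ws
    by_cases hc : (c == ' ' || c == '\t') = true
    · have hio : pvIndentsOnly (c :: r) = pvIndentsOnly r := by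
        rcases Bool.or_eq_true_iff.mp hc with h | h <;>
          simp [pvIndentsOnly, beq_iff_eq.mp h]
      rw [show pvF ws false (c :: r) = pvF (ws ++ [c]) false r from by simp [pvF, hc],
        ih, hio]
      split <;> simp
    · have hio : pvIndentsOnly (c :: r) = false := by
        simp only [Bool.or_eq_true, beq_iff_eq, not_or] at hc
        simp [pvIndentsOnly, hc.1, hc.2]
      rw [show pvF ws false (c :: r) = ws ++ c :: pvF [] true r from by simp [pvF, hc],
        pvF_true, hio]
      simp

theorem pvRun_eq (s : List Char) :
    ∀ ws dirty, pvRun s ws dirty = pvG ws dirty (pvLines s) := by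
  induction s with
  | nil => intro ws dirty; simp [pvRun, pvLines, pvG, pvF, pvJ]
  | cons c r ih =>
    intro ws dirty
    rcases hlr : pvLines r with _ | ⟨l, t⟩
    · exact absurd hlr (pvLines_ne_nil r)
    by_cases hc : (c == ' ' || c == '\t') = true
    · have hnl : ¬ c = '\n' := by
        rcases Bool.or_eq_true_iff.mp hc with h | h <;> simp [beq_iff_eq.mp h]
      rw [show pvRun (c :: r) ws dirty = pvRun r (ws ++ [c]) dirty from by simp [pvRun, hc],
        ih]
      simp only [pvLines, if_neg hnl, hlr, pvConsHead, List.singleton_append, pvG]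
      rw [show pvF ws dirty (c :: l) = pvF (ws ++ [c]) dirty l from by simp [pvF, hc]]
    · by_cases hnl : c = '\n'
      · subst hnl
        rw [show pvRun ('\n' :: r) ws dirty
              = (if dirty then ws else []) ++ '\n' :: pvRun r [] false from by
            simp [pvRun, hc], ih]
        simp only [pvLines, if_pos rfl, hlr, pvG, pvJ, List.map_cons, List.flatten_cons]
        rw [pvF_false]
        simp only [pvBlank, List.nil_append]
        simp [pvF]
      · rw [show pvRun (c :: r) ws dirty = ws ++ c :: pvRun r [] true from by
            simp [pvRun, hc, hnl], ih]
        simp only [pvLines, if_neg hnl, hlr, pvConsHead, List.singleton_append, pvG]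
        rw [show pvF ws dirty (c :: l) = ws ++ c :: pvF [] true l from by simp [pvF, hc],
          pvF_true]
        simp [pvF_true]

theorem pv_foldB (s : List Char) :
    ∀ (out ws : List Char) (dirty : Bool),
      (let st := s.foldl pvStep (out, ws, dirty)
       if st.2.2 then st.1 ++ st.2.1 else st.1) = out ++ pvRun s ws dirty := by
  induction s with
  | nil => intro out ws dirty; cases dirty <;> simp [pvRun]
  | cons c r ih =>
    intro out ws dirty
    by_cases hc : (c == ' ' || c == '\t') = true
    · rw [show (c :: r).foldl pvStep (out, ws, dirty) = r.foldl pvStep (out, ws ++ [c], dirty)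
          from by simp [pvStep, hc]]
      rw [ih]
      simp [pvRun, hc]
    · by_cases hnl : c = '\n'
      · subst hnl
        rw [show ('\n' :: r).foldl pvStep (out, ws, dirty)
              = r.foldl pvStep ((if dirty then out ++ ws else out) ++ ['\n'], [], false)
            from by simp [pvStep, hc]]
        rw [ih]
        simp only [pvRun, hc, if_neg (by simp : ¬((('\n' : Char) == ' ' || ('\n' : Char) == '\t') = true)), if_pos rfl]
        cases dirty <;> simp
      · rw [show (c :: r).foldl pvStep (out, ws, dirty)
              = r.foldl pvStep (out ++ ws ++ [c], [], true) from by
            simp [pvStep, hc, hnl]]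
        rw [ih]
        simp [pvRun, hc, hnl]

theorem pv_join_cons (x : List Char) (ls : List (List Char)) :
    PySem.Chars.join ['\n'] (x :: ls) = x ++ (ls.map (fun y => ('\n' : Char) :: y)).flatten := by
  induction ls generalizing x with
  | nil => simp [PySem.Chars.join, List.intercalate]
  | cons y t ih =>
    have h1 : (['\n'] : List Char).intercalate (x :: y :: t)
        = x ++ ['\n'] ++ (['\n'] : List Char).intercalate (y :: t) := by
      simp [List.intercalate]
    show (['\n'] : List Char).intercalate (x :: y :: t) = _
    rw [h1]
    have := ih y
    simp only [PySem.Chars.join] at this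
    rw [this]
    simp

-- ===== VERDICT (by name: the statement is the Claim_ definition above) =====
theorem process_keep_indents_on_empty_lines_spec : Claim_equal_process_keep_indents_on_empty_lines := by
  intro code need _
  show process_keep_indents_on_empty_lines code need = process_keep_indents_on_empty_lines_alt code need
  unfold process_keep_indents_on_empty_lines process_keep_indents_on_empty_lines_alt
  have hfold := pv_foldA need ((PySem.Chars.splitOn code.toList ['\n']).length : Int)
    (PySem.Chars.splitOn code.toList ['\n']) 0 [] (by simp)
  simp only [] at hfold ⊢
  rw [hfold]
  cases need with
  | true =>
    rw [if_pos rfl]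
    simp only [Bool.not_true, Bool.and_false, Bool.false_eq_true, if_false, List.nil_append]
    have hmap : (PySem.Chars.splitOn code.toList ['\n']).map (fun line => line)
        = PySem.Chars.splitOn code.toList ['\n'] := List.map_id' _
    rw [hmap, pv_join_splitOn ['\n'] code.toList (by simp)]
    simp [String.ofList]
  | false =>
    rw [if_neg (by simp)]
    rw [pv_foldB code.toList [] [] false, pvRun_eq]
    simp only [List.nil_append]
    rw [pv_splitOn_eq_lines]
    rcases hl : pvLines code.toList with _ | ⟨l, t⟩
    · exact absurd hl (pvLines_ne_nil code.toList)
    simp only [Bool.not_false, Bool.and_true, List.map_cons]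
    rw [pv_join_cons, pvG]
    rw [pvF_false]
    simp only [pvBlank, pvJ, List.map_map, List.nil_append]
    rfl
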